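-- pv_equiv track=rewrite | github.com/TwinKay/Algorithms | 프로그래머스/lv1/12930. 이상한 문자 만들기/이상한 문자 만들기.py | solution
-- ===== SOURCE A (Python) =====
-- def solution(s):
--     res = []
--     up = True
--     for i in s:
--         if i == ' ':
--             up = True
--             res.append(' ')
--
--         elif up == True:
--             up = False
--             res.append(i.upper())
--         else:
--             up = True
--             res.append(i.lower())
--
--     return ''.join(res)
-- ===== SOURCE B (Python) =====
-- def solution(s):
--     parts = s.split(' ')
--     out = []
--     for w in parts:
--         out.append(''.join(c.upper() if i % 2 == 0 else c.lower()
--                            for i, c in enumerate(w)))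
--     return ' '.join(out)
-- ===== Notes on version B (the rewrite author's own statement) =====
-- stated objective: alternative
-- what changed: Replaces the single flat scan carrying a toggling boolean flag with a split-into-words decomposition: split on the single-space separator, transform each word by character-index parity (even->upper, odd->lower), and rejoin the words with the space separator.
import Mathlib
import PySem

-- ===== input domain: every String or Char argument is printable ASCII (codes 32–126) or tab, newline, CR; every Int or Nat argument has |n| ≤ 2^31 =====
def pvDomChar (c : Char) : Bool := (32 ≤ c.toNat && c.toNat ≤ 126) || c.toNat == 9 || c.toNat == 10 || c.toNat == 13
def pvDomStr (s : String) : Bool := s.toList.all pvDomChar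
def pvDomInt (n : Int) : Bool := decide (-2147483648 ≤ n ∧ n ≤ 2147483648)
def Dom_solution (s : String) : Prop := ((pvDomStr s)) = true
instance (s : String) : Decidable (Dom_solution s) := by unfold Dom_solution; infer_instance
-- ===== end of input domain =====

-- B replaces A's flat scan with a carried toggle flag by a split-on-' ' / per-word
-- index-parity / ' '.join decomposition (objective: alternative; same cost).

-- ===== PORT A =====
-- one flat pass over the characters; state = (res, up), res a list of 1-char strings
def solution (s : String) : String :=
  let st := s.toList.foldl
    (fun (st : List (List Char) × Bool) i =>
      if i = ' ' then (st.1 ++ [[' ']], true)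
      else if st.2 = true then (st.1 ++ [PySem.Chars.upper [i]], false)
      else (st.1 ++ [PySem.Chars.lower [i]], true))
    ([], true)
  String.ofList (PySem.Chars.join [] st.1)

-- ===== PORT B =====
-- s.split(' '), each word transformed by index parity, rejoined with ' '.join
def solution_alt (s : String) : String :=
  let parts := PySem.Chars.splitOn s.toList [' ']
  let out := parts.map (fun w =>
    w.zipIdx.map (fun ci =>
      if ci.2 % 2 = 0 then PySem.Chars.upperChar ci.1 else PySem.Chars.lowerChar ci.1))
  String.ofList (PySem.Chars.join [' '] out)

-- ===== PRECONDITION & SPEC =====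
def Spec_solution (s : String) (out : String) : Prop := out = solution_alt s
instance (s : String) (out : String) : Decidable (Spec_solution s out) := by unfold Spec_solution; infer_instance

-- ===== CLAIM (what is proved, stated in full; the proofs are below) =====
def Claim_equal_solution : Prop := ∀ (s : String), Dom_solution s → Spec_solution s (solution s)

-- ===== LEMMAS AND PROOFS =====

-- common recursive specification: A's scan written as structural recursion
def pvScan (up : Bool) : List Char → List Char
  | [] => []
  | c :: cs =>
    if c = ' ' then ' ' :: pvScan true cs
    else if up then PySem.Chars.upperChar c :: pvScan false cs
    else PySem.Chars.lowerChar c :: pvScan true cs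

-- simple recursive split on the single character ' '
def pvSplit : List Char → List (List Char)
  | [] => [[]]
  | c :: cs => if c = ' ' then [] :: pvSplit cs else (pvSplit cs).modifyHead (c :: ·)

def pvTr (k : Nat) (w : List Char) : List Char :=
  (w.zipIdx k).map (fun ci =>
    if ci.2 % 2 = 0 then PySem.Chars.upperChar ci.1 else PySem.Chars.lowerChar ci.1)

lemma pvJoin_nil_eq_flatten (xs : List (List Char)) :
    PySem.Chars.join [] xs = xs.flatten := by
  induction xs with
  | nil => simp [PySem.Chars.join_nil]
  | cons p rest ih =>
    cases rest with
    | nil => simp [PySem.Chars.join_singleton]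
    | cons q t =>
      rw [PySem.Chars.join_cons_cons]
      simp [ih]

lemma pvSplit_ne_nil (l : List Char) : pvSplit l ≠ [] := by
  induction l with
  | nil => simp [pvSplit]
  | cons c cs ih =>
    simp only [pvSplit]
    split
    · simp
    · cases h : pvSplit cs with
      | nil => exact absurd h ih
      | cons a t => simp

lemma pvSplitOn_go (fuel : Nat) (l cur : List Char) (acc : List (List Char))
    (h : l.length ≤ fuel) :
    PySem.Chars.splitOn.go [' '] fuel l cur acc
      = acc.reverse ++ (pvSplit l).modifyHead (cur.reverse ++ ·) := by
  induction fuel generalizing l cur acc with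
  | zero =>
    interval_cases hl : l.length
    match l, hl with
    | [], _ => simp [PySem.Chars.splitOn.go, pvSplit]
  | succ fuel ih =>
    cases l with
    | nil => simp [PySem.Chars.splitOn.go, pvSplit]
    | cons c rest =>
      simp only [PySem.Chars.splitOn.go]
      by_cases hc : c = ' '
      · subst hc
        rw [if_pos (by simp [List.isPrefixOf])]
        rw [ih _ _ _ (by simpa using Nat.le_of_succ_le_succ (by simpa using h))]
        obtain ⟨a, t, hs⟩ : ∃ a t, pvSplit rest = a :: t := by
          cases h' : pvSplit rest with
          | nil => exact absurd h' (pvSplit_ne_nil rest)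
          | cons a t => exact ⟨a, t, rfl⟩
        simp [pvSplit, hs, List.modifyHead]
      · rw [if_neg (by simpa [List.isPrefixOf] using fun h => hc h.symm)]
        rw [ih _ _ _ (by simpa using Nat.le_of_succ_le_succ (by simpa using h))]
        simp only [pvSplit, if_neg hc]
        cases hs : pvSplit rest with
        | nil => exact absurd hs (pvSplit_ne_nil rest)
        | cons a t => simp [List.modifyHead]

lemma pvSplitOn_eq (l : List Char) : PySem.Chars.splitOn l [' '] = pvSplit l := by
  have := pvSplitOn_go (l.length + 1) l [] [] (by omega)
  simp only [PySem.Chars.splitOn, this, List.reverse_nil, List.nil_append]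
  cases hs : pvSplit l with
  | nil => exact absurd hs (pvSplit_ne_nil l)
  | cons a t => simp

lemma pvB_main (l : List Char) (k : Nat) :
    PySem.Chars.join [' ']
      (pvTr k (pvSplit l).headI :: ((pvSplit l).tail).map (pvTr 0))
      = pvScan (decide (k % 2 = 0)) l := by
  induction l generalizing k with
  | nil => simp [pvSplit, pvTr, pvScan, PySem.Chars.join_singleton]
  | cons c cs ih =>
    by_cases hc : c = ' '
    · subst hc
      rw [show pvSplit (' ' :: cs) = [] :: pvSplit cs from by simp [pvSplit]]
      cases hs : pvSplit cs with
      | nil => exact absurd hs (pvSplit_ne_nil cs)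
      | cons a t =>
        simp only [List.headI_cons, List.tail_cons, List.map_cons]
        rw [PySem.Chars.join_cons_cons]
        have h0 := ih 0
        rw [hs] at h0
        simp only [List.headI_cons, List.tail_cons, decide_true] at h0
        rw [show pvTr k ([] : List Char) = [] from rfl, h0]
        simp [pvScan]
    · rw [show pvSplit (c :: cs) = (pvSplit cs).modifyHead (c :: ·) from by
        simp [pvSplit, hc]]
      cases hs : pvSplit cs with
      | nil => exact absurd hs (pvSplit_ne_nil cs)
      | cons a t =>
        simp only [List.modifyHead, List.headI_cons, List.tail_cons]
        have hk := ih (k + 1)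
        rw [hs] at hk
        simp only [List.headI, List.tail] at hk
        have htr : pvTr k (c :: a) = (if k % 2 = 0 then PySem.Chars.upperChar c
            else PySem.Chars.lowerChar c) :: pvTr (k + 1) a := by
          simp [pvTr, List.zipIdx_cons]
        cases t with
        | nil =>
          simp only [List.map_nil] at hk ⊢
          rw [PySem.Chars.join_singleton] at hk ⊢
          rcases Nat.eq_zero_or_pos (k % 2) with h2 | h2
          · have h2' : (k + 1) % 2 = 1 := by omega
            simp [htr, h2, pvScan, hc, h2'] at *
            simp [← hk]
          · have h2' : k % 2 = 1 := by omega
            have h2'' : (k + 1) % 2 = 0 := by omega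
            simp [htr, h2', pvScan, hc, h2''] at *
            simp [← hk]
        | cons b t' =>
          rw [List.map_cons, PySem.Chars.join_cons_cons] at hk
          rw [List.map_cons, PySem.Chars.join_cons_cons]
          rcases Nat.eq_zero_or_pos (k % 2) with h2 | h2
          · have h2' : (k + 1) % 2 = 1 := by omega
            simp [htr, h2, pvScan, hc, h2'] at *
            simp [← hk]
          · have h2' : k % 2 = 1 := by omega
            have h2'' : (k + 1) % 2 = 0 := by omega
            simp [htr, h2', pvScan, hc, h2''] at *
            simp [← hk]

lemma pvA_foldl (l : List Char) (res : List (List Char)) (up : Bool) :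
    (l.foldl
      (fun (st : List (List Char) × Bool) i =>
        if i = ' ' then (st.1 ++ [[' ']], true)
        else if st.2 = true then (st.1 ++ [PySem.Chars.upper [i]], false)
        else (st.1 ++ [PySem.Chars.lower [i]], true))
      (res, up)).1.flatten = res.flatten ++ pvScan up l := by
  induction l generalizing res up with
  | nil => simp [pvScan]
  | cons c cs ih =>
    by_cases hc : c = ' '
    · subst hc
      simp [List.foldl_cons, ih, pvScan]
    · cases up with
      | true =>
        have h := ih (res ++ [PySem.Chars.upper [c]]) false
        simp only [List.foldl_cons, if_neg hc]
        rw [if_pos trivial, h]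
        simp [pvScan, hc, PySem.Chars.upper]
      | false =>
        have h := ih (res ++ [PySem.Chars.lower [c]]) true
        simp only [List.foldl_cons, if_neg hc]
        rw [if_neg (by simp), h]
        simp [pvScan, hc, PySem.Chars.lower]

lemma pvB_eq (l : List Char) :
    PySem.Chars.join [' '] ((pvSplit l).map (pvTr 0)) = pvScan true l := by
  have hB := pvB_main l 0
  cases hs : pvSplit l with
  | nil => exact absurd hs (pvSplit_ne_nil l)
  | cons a t =>
    rw [hs] at hB
    simp only [List.headI_cons, List.tail_cons, decide_true] at hB
    rw [List.map_cons]
    exact hB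

-- ===== VERDICT (by name: the statement is the Claim_ definition above) =====
theorem solution_spec : Claim_equal_solution := by
  intro s _
  unfold Spec_solution
  simp only [solution, solution_alt]
  rw [pvJoin_nil_eq_flatten]
  have hA := pvA_foldl s.toList [] true
  simp only [List.flatten_nil, List.nil_append] at hA
  rw [hA, pvSplitOn_eq]
  exact congrArg String.ofList (pvB_eq s.toList).symm
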